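-- pv_equiv track=rewrite | github.com/AdrianSuliga/WDI | 03 - Zadania z pętlami 2/ex_08.py | FibSubSeq
-- ===== SOURCE A (Python) =====
-- def FibSubSeq(n):
--     Ll, Lm, Lr = 0, 0, 1
--     Rl, Rm, Rr = 0, 0, 1
--     SR, SL = 0, 0
--     #Sum SR:
--     while True:
--         if SR == 0:
--             SR += 1
--             if SR > n:
--                 break
--         if SR == n: return True
--         Rl = Rm
--         Rm = Rr
--         Rr = Rm + Rl
--         if SR <= n:
--             SR += Rr
--         else:
--             break
--     #Sum SL:
--     while True:
--         if SL == 0: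
--             SL += 1
--             if SR - SL == n:
--                 return True
--         Ll = Lm
--         Lm = Lr
--         Lr = Lm + Ll
--         if SL <= SR:
--             SL += Lr
--         else:
--             return False
--         if SR - SL == n:
--             return True
-- ===== SOURCE B (Python) =====
-- def FibSubSeq(n):
--     # prefix sums of 1,1,2,3,5,... with a hash set: n is a window sum
--     # iff two prefix sums differ by n.
--     seen = set()
--     a, b, p = 1, 1, 0
--     while True:
--         seen.add(p)
--         if p - n in seen:
--             return True
--         if a > n:
--             return False
--         p += a
--         a, b = b, a + b
-- ===== Notes on version B (the rewrite author's own statement) =====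
-- stated objective: alternative
-- what changed: A's two sequential while-loops (grow a prefix sum past n, then slide a second prefix sum to test one candidate window end) are replaced by a single pass that generates Fibonacci prefix sums and looks each 'prefix - n' up in a hash set of all earlier prefix sums, returning True on the first hit and False once the latest Fibonacci term exceeds n.
-- intended difference: On n = -1 A's second loop also tests the one window whose left end overshoots the right end (SL = SR + 1) and so returns True, although no window of positive Fibonacci numbers sums to a negative value; B returns the intended False (A and B agree on every other input, including all other negatives). — e.g. on FibSubSeq(-1): A returns true, B returns false
import Mathlib
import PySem

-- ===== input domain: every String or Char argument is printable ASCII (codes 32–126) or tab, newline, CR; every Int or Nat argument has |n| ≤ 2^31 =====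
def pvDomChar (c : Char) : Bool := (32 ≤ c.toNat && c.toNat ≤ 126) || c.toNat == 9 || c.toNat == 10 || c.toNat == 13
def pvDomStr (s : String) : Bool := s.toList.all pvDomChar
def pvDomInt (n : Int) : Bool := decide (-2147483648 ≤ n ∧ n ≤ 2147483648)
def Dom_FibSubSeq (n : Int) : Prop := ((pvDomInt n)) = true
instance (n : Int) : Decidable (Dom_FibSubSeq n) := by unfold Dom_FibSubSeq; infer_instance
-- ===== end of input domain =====

-- B is a one-pass prefix-sum/hash-set re-implementation of A's two-pointer scan; return values agree
-- everywhere on the domain except n = -1 (see D_FibSubSeq below).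

-- ===== PORT A =====
-- First Python while-loop ("Sum SR").  'none' encodes 'return True'; 'some SR' encodes 'break' with
-- the current value of SR (control then falls through to the second loop).  The Nat argument is fuel
-- that only makes the recursion structural; it is never exhausted on the stated domain.
def aloop1 (n : Int) : Nat → Int → Int → Int → Int → Option Int
  | 0, _, _, _, SR => some SR
  | fuel+1, _Rl, Rm, Rr, SR =>
    if SR = 0 then
      -- SR += 1; if SR > n: break
      if SR + 1 > n then some (SR + 1)
      else
        -- if SR == n: return True
        if SR + 1 = n then none
        else
          -- Rl = Rm; Rm = Rr; Rr = Rm + Rl; if SR <= n: SR += Rr else break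
          if SR + 1 ≤ n then aloop1 n fuel Rm Rr (Rr + Rm) (SR + 1 + (Rr + Rm))
          else some (SR + 1)
    else
      if SR = n then none
      else if SR ≤ n then aloop1 n fuel Rm Rr (Rr + Rm) (SR + (Rr + Rm))
      else some SR

-- Second Python while-loop ("Sum SL"): returns the function's Bool result.
def aloop2 (n SR : Int) : Nat → Int → Int → Int → Int → Bool
  | 0, _, _, _, _ => false
  | fuel+1, _Ll, Lm, Lr, SL =>
    if SL = 0 then
      -- SL += 1; if SR - SL == n: return True
      if SR - (SL + 1) = n then true
      else
        -- Ll = Lm; Lm = Lr; Lr = Lm + Ll; if SL <= SR: SL += Lr else return False; if SR - SL == n: return True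
        if SL + 1 ≤ SR then
          if SR - (SL + 1 + (Lr + Lm)) = n then true
          else aloop2 n SR fuel Lm Lr (Lr + Lm) (SL + 1 + (Lr + Lm))
        else false
    else
      if SL ≤ SR then
        if SR - (SL + (Lr + Lm)) = n then true
        else aloop2 n SR fuel Lm Lr (Lr + Lm) (SL + (Lr + Lm))
      else false

def FibSubSeq (n : Int) : Bool :=
  match aloop1 n 60 0 0 1 0 with
  | none => true
  | some SR => aloop2 n SR 60 0 0 1 0

-- ===== PORT B =====
-- One loop: maintain the set of Fibonacci prefix sums seen so far; n is a contiguous Fibonacci sum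
-- iff two prefix sums differ by n.
def bloop (n : Int) : Nat → Int → Int → Int → PySem.Set Int → Bool
  | 0, _, _, _, _ => false
  | fuel+1, a, b, p, seen =>
    let seen' := PySem.Set.add seen p
    if PySem.Set.contains seen' (p - n) then true
    else if a > n then false
    else bloop n fuel b (a + b) (p + a) seen'

def FibSubSeq_alt (n : Int) : Bool := bloop n 60 1 1 0 PySem.Set.empty

-- ===== PRECONDITION & SPEC =====
-- On n = -1 A's second loop also tests the one window that overshoots SR (SL = SR + 1), accidentally
-- answering True for -1 although no Fibonacci window sums to a negative number; B returns the intended False.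
def D_FibSubSeq (n : Int) : Prop := n = -1
instance (n : Int) : Decidable (D_FibSubSeq n) := by unfold D_FibSubSeq; infer_instance
def Spec_FibSubSeq (n : Int) (out : Bool) : Prop := ¬ D_FibSubSeq n → out = FibSubSeq_alt n
instance (n : Int) (out : Bool) : Decidable (Spec_FibSubSeq n out) := by unfold Spec_FibSubSeq; infer_instance
def pvDiffWitness_FibSubSeq : Int := (-1)
def pvDiffWitnessOut_FibSubSeq : Bool × Bool := (true, false)

-- ===== CLAIM (what is proved, stated in full; the proofs are below) =====
def Claim_unchanged_FibSubSeq : Prop := ∀ (n : Int), Dom_FibSubSeq n → Spec_FibSubSeq n (FibSubSeq n)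
def Claim_changed_FibSubSeq : Prop := Dom_FibSubSeq (pvDiffWitness_FibSubSeq) ∧ D_FibSubSeq (pvDiffWitness_FibSubSeq) ∧ FibSubSeq (pvDiffWitness_FibSubSeq) = pvDiffWitnessOut_FibSubSeq.1 ∧ FibSubSeq_alt (pvDiffWitness_FibSubSeq) = pvDiffWitnessOut_FibSubSeq.2 ∧ pvDiffWitnessOut_FibSubSeq.1 ≠ pvDiffWitnessOut_FibSubSeq.2
def Claim_exact_FibSubSeq : Prop := ∀ (n : Int), Dom_FibSubSeq n → D_FibSubSeq n → FibSubSeq n ≠ FibSubSeq_alt n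


-- ===== LEMMAS AND PROOFS =====

-- Mathematical Fibonacci scaffolding (proof-side only).
-- fbAux computes (f k, f (k+1)) in linear time so that `decide` can evaluate it.
def fbAux : Nat → Int × Int
  | 0 => (1, 1)
  | k+1 => ((fbAux k).2, (fbAux k).1 + (fbAux k).2)

def fb (k : Nat) : Int := (fbAux k).1

def Pf : Nat → Int
  | 0 => 0
  | k+1 => Pf k + fb k

theorem fb_rec (k : Nat) : fb (k+2) = fb (k+1) + fb k := by
  simp [fb, fbAux]; ring

theorem fbAux_bounds (k : Nat) : 1 ≤ (fbAux k).1 ∧ (fbAux k).1 ≤ (fbAux k).2 := by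
  induction k with
  | zero => simp [fbAux]
  | succ k ih => simp [fbAux]; omega

theorem fb_pos (k : Nat) : 1 ≤ fb k := (fbAux_bounds k).1

theorem fb_le_succ (k : Nat) : fb k ≤ fb (k+1) := by
  have h := fbAux_bounds k
  simp [fb, fbAux]; omega

theorem fb_mono {j k : Nat} (h : j ≤ k) : fb j ≤ fb k := by
  induction k with
  | zero =>
    have hj : j = 0 := by omega
    subst hj; rfl
  | succ k ih =>
    rcases Nat.lt_or_ge j (k+1) with h' | h'
    · exact le_trans (ih (by omega)) (fb_le_succ k)
    · have : j = k+1 := by omega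
      subst this; rfl

theorem Pf_succ (k : Nat) : Pf (k+1) = Pf k + fb k := rfl

theorem Pf_lt_succ (k : Nat) : Pf k < Pf (k+1) := by
  have := fb_pos k; rw [Pf_succ]; omega

theorem Pf_mono_lt {j k : Nat} (h : j < k) : Pf j < Pf k := by
  induction k with
  | zero => omega
  | succ k ih =>
    rcases Nat.lt_or_ge j k with h' | h'
    · exact lt_trans (ih h') (Pf_lt_succ k)
    · have hjk : j = k := by omega
      rw [hjk]; exact Pf_lt_succ k

theorem Pf_mono_le {j k : Nat} (h : j ≤ k) : Pf j ≤ Pf k := by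
  rcases Nat.lt_or_ge j k with h' | h'
  · exact le_of_lt (Pf_mono_lt h')
  · have : j = k := by omega
    subst this; rfl

theorem Pf_lt_inv {j k : Nat} (h : Pf j < Pf k) : j < k := by
  by_contra h'
  have hk : k ≤ j := by omega
  have := Pf_mono_le hk
  omega

theorem Pf_pos (j : Nat) (h : 0 < j) : 0 < Pf j := by
  have h1 := Pf_mono_lt h
  have h0 : Pf 0 = 0 := rfl
  omega

theorem Pf_eq_fb (k : Nat) : Pf k = fb (k+1) - 1 := by
  induction k with
  | zero => decide
  | succ k ih => rw [Pf_succ, ih, fb_rec]; ring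

theorem Pf_window (k : Nat) : Pf (k+2) - Pf k = fb (k+2) := by
  rw [Pf_succ, Pf_succ, fb_rec]; ring

-- One-step unfolding equations for the three loops.
theorem aloop1_zero (n Rl Rm Rr SR : Int) : aloop1 n 0 Rl Rm Rr SR = some SR := rfl

theorem aloop1_succ (n : Int) (fuel : Nat) (Rl Rm Rr SR : Int) :
    aloop1 n (fuel+1) Rl Rm Rr SR =
      (if SR = 0 then
        if SR + 1 > n then some (SR + 1)
        else if SR + 1 = n then none
        else if SR + 1 ≤ n then aloop1 n fuel Rm Rr (Rr + Rm) (SR + 1 + (Rr + Rm))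
        else some (SR + 1)
      else
        if SR = n then none
        else if SR ≤ n then aloop1 n fuel Rm Rr (Rr + Rm) (SR + (Rr + Rm))
        else some SR) := rfl

theorem aloop2_zero (n SR Ll Lm Lr SL : Int) : aloop2 n SR 0 Ll Lm Lr SL = false := rfl

theorem aloop2_succ (n SR : Int) (fuel : Nat) (Ll Lm Lr SL : Int) :
    aloop2 n SR (fuel+1) Ll Lm Lr SL =
      (if SL = 0 then
        if SR - (SL + 1) = n then true
        else if SL + 1 ≤ SR then
          if SR - (SL + 1 + (Lr + Lm)) = n then true
          else aloop2 n SR fuel Lm Lr (Lr + Lm) (SL + 1 + (Lr + Lm))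
        else false
      else
        if SL ≤ SR then
          if SR - (SL + (Lr + Lm)) = n then true
          else aloop2 n SR fuel Lm Lr (Lr + Lm) (SL + (Lr + Lm))
        else false) := rfl

theorem bloop_succ (n : Int) (fuel : Nat) (a b p : Int) (seen : PySem.Set Int) :
    bloop n (fuel+1) a b p seen =
      (if PySem.Set.contains (PySem.Set.add seen p) (p - n) then true
      else if a > n then false
      else bloop n fuel b (a + b) (p + a) (PySem.Set.add seen p)) := rfl

-- Characterization of A's first loop from a generic state.
theorem L1 (n : Int) : ∀ (m j : Nat) (Rl : Int),
    Pf (j+1) ≤ n → n < Pf (j+2+m) →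
    ((aloop1 n m Rl (fb j) (fb (j+1)) (Pf (j+2)) = none ↔ ∃ k, j+2 ≤ k ∧ Pf k = n) ∧
     (∀ SR', aloop1 n m Rl (fb j) (fb (j+1)) (Pf (j+2)) = some SR' →
        ∃ K, 2 ≤ K ∧ SR' = Pf K ∧ Pf (K-1) ≤ n ∧ n < Pf K)) := by
  intro m
  induction m with
  | zero =>
    intro j Rl h1 h2
    rw [Nat.add_zero] at h2
    rw [aloop1_zero]
    constructor
    · constructor
      · intro h; cases h
      · rintro ⟨k, hk, hPk⟩
        have := Pf_mono_le hk
        omega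
    · rintro SR' h
      injection h with h
      exact ⟨j+2, by omega, h.symm, by simpa using h1, by omega⟩
  | succ m ih =>
    intro j Rl h1 h2
    have hpos : ¬ (Pf (j+2) = 0) := by
      have := Pf_pos (j+2) (by omega)
      omega
    rw [aloop1_succ, if_neg hpos]
    by_cases heq : Pf (j+2) = n
    · rw [if_pos heq]
      constructor
      · constructor
        · intro _; exact ⟨j+2, le_refl _, heq⟩
        · intro _; rfl
      · intro SR' h; cases h
    · rw [if_neg heq]
      by_cases hle : Pf (j+2) ≤ n
      · rw [if_pos hle]
        have harg1 : fb (j+1) + fb j = fb (j+2) := (fb_rec j).symm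
        have harg2 : Pf (j+2) + (fb (j+1) + fb j) = Pf (j+3) := by
          rw [harg1, ← Pf_succ]
        rw [harg2, harg1]
        have h2' : n < Pf (j+1+2+m) := by
          rw [show j+1+2+m = j+2+(m+1) by omega]; exact h2
        have hih := ih (j+1) (fb j) hle h2'
        rw [show j+1+1 = j+2 by omega, show j+1+2 = j+3 by omega] at hih
        obtain ⟨hnone, hsome⟩ := hih
        constructor
        · rw [hnone]
          constructor
          · rintro ⟨k, hk, hPk⟩; exact ⟨k, by omega, hPk⟩
          · rintro ⟨k, hk, hPk⟩
            refine ⟨k, ?_, hPk⟩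
            rcases Nat.lt_or_ge (j+2) k with h' | h'
            · omega
            · have hkk : k = j+2 := by omega
              subst hkk; exact absurd hPk heq
        · exact hsome
      · rw [if_neg hle]
        constructor
        · constructor
          · intro h; cases h
          · rintro ⟨k, hk, hPk⟩
            have := Pf_mono_le hk
            omega
        · rintro SR' h
          injection h with h
          exact ⟨j+2, by omega, h.symm, by simpa using h1, by omega⟩

-- Characterization of A's second loop from a generic state.
theorem L2 (n SR : Int) : ∀ (m j : Nat) (Ll : Int),
    Pf (j+1) ≤ SR → SR < Pf (j+2+m) →
    (aloop2 n SR m Ll (fb j) (fb (j+1)) (Pf (j+2)) = true ↔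
      ∃ k, j+2 ≤ k ∧ Pf k ≤ SR ∧ SR - Pf (k+1) = n) := by
  intro m
  induction m with
  | zero =>
    intro j Ll h1 h2
    rw [Nat.add_zero] at h2
    rw [aloop2_zero]
    constructor
    · intro h; cases h
    · rintro ⟨k, hk, hPk, -⟩
      have := Pf_mono_le hk
      omega
  | succ m ih =>
    intro j Ll h1 h2
    have hpos : ¬ (Pf (j+2) = 0) := by
      have := Pf_pos (j+2) (by omega)
      omega
    rw [aloop2_succ, if_neg hpos]
    by_cases hle : Pf (j+2) ≤ SR
    · rw [if_pos hle]
      have harg1 : fb (j+1) + fb j = fb (j+2) := (fb_rec j).symm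
      have harg2 : Pf (j+2) + (fb (j+1) + fb j) = Pf (j+3) := by
        rw [harg1, ← Pf_succ]
      rw [harg2, harg1]
      by_cases hhit : SR - Pf (j+3) = n
      · rw [if_pos hhit]
        constructor
        · intro _
          exact ⟨j+2, le_refl _, hle, by rw [show j+2+1 = j+3 by omega]; exact hhit⟩
        · intro _; rfl
      · rw [if_neg hhit]
        have h2' : SR < Pf (j+1+2+m) := by
          rw [show j+1+2+m = j+2+(m+1) by omega]; exact h2
        have hih := ih (j+1) (fb j) hle h2'
        rw [show j+1+1 = j+2 by omega, show j+1+2 = j+3 by omega] at hih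
        rw [hih]
        constructor
        · rintro ⟨k, hk, hPk, hv⟩; exact ⟨k, by omega, hPk, hv⟩
        · rintro ⟨k, hk, hPk, hv⟩
          refine ⟨k, ?_, hPk, hv⟩
          rcases Nat.lt_or_ge (j+2) k with h' | h'
          · omega
          · have hkk : k = j+2 := by omega
            subst hkk
            rw [show j+2+1 = j+3 by omega] at hv
            exact absurd hv hhit
    · rw [if_neg hle]
      constructor
      · intro h; cases h
      · rintro ⟨k, hk, hPk, -⟩
        have := Pf_mono_le hk
        omega

-- Characterization of B's single loop from a generic state.
theorem LB (n : Int) : ∀ (m j : Nat),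
    (∃ t, t < m ∧ n < fb (j+t)) →
    (bloop n m (fb j) (fb (j+1)) (Pf j) ((List.range j).map Pf) = true ↔
      ∃ k i : Nat, j ≤ k ∧ i ≤ k ∧ Pf k - Pf i = n ∧ ∀ l, j ≤ l → l < k → fb l ≤ n) := by
  intro m
  induction m with
  | zero =>
    rintro j ⟨t, ht, -⟩
    exact absurd ht (by omega)
  | succ m ih =>
    rintro j ⟨t, ht, hfb⟩
    have hnotmem : Pf j ∉ (List.range j).map Pf := by
      intro h
      obtain ⟨i, hi, hPi⟩ := List.mem_map.mp h
      have := Pf_mono_lt (List.mem_range.mp hi)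
      omega
    have hseen : PySem.Set.add ((List.range j).map Pf) (Pf j) = (List.range (j+1)).map Pf := by
      rw [PySem.Set.add_of_not_mem hnotmem, List.range_succ, List.map_append]
      rfl
    rw [bloop_succ, hseen]
    by_cases hhit : PySem.Set.contains ((List.range (j+1)).map Pf) (Pf j - n) = true
    · rw [if_pos hhit]
      obtain ⟨i, hi, hPi⟩ := List.mem_map.mp ((PySem.Set.contains_iff _ _).mp hhit)
      have hi' := List.mem_range.mp hi
      constructor
      · intro _
        exact ⟨j, i, le_refl _, by omega, by omega, by intro l hl1 hl2; omega⟩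
      · intro _; rfl
    · rw [if_neg hhit]
      have hnohit : ∀ i : Nat, i ≤ j → Pf j - Pf i ≠ n := by
        intro i hij hc
        exact hhit ((PySem.Set.contains_iff _ _).mpr (List.mem_map.mpr
          ⟨i, List.mem_range.mpr (by omega), by omega⟩))
      by_cases hstop : fb j > n
      · rw [if_pos hstop]
        constructor
        · intro h; cases h
        · rintro ⟨k, i, hjk, hik, hv, hall⟩
          rcases Nat.lt_or_ge j k with h' | h'
          · exact absurd (hall j (le_refl _) h') (by omega)
          · have hkk : k = j := by omega
            subst hkk
            exact absurd hv (hnohit i hik)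
      · rw [if_neg hstop]
        have harg1 : fb j + fb (j+1) = fb (j+2) := by rw [fb_rec]; ring
        have harg2 : Pf j + fb j = Pf (j+1) := (Pf_succ j).symm
        rw [harg1, harg2]
        have ht0 : t ≠ 0 := by
          intro h; subst h
          rw [Nat.add_zero] at hfb
          omega
        have hfuel : ∃ t', t' < m ∧ n < fb (j+1+t') := by
          refine ⟨t-1, by omega, ?_⟩
          rw [show j+1+(t-1) = j+t by omega]
          exact hfb
        have hih := ih (j+1) hfuel
        rw [show j+1+1 = j+2 by omega] at hih
        rw [hih]
        constructor
        · rintro ⟨k, i, hjk, hik, hv, hall⟩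
          refine ⟨k, i, by omega, hik, hv, ?_⟩
          intro l hl1 hl2
          rcases Nat.lt_or_ge l (j+1) with h3 | h3
          · have hlj : l = j := by omega
            subst hlj; omega
          · exact hall l h3 hl2
        · rintro ⟨k, i, hjk, hik, hv, hall⟩
          rcases Nat.lt_or_ge j k with h' | h'
          · refine ⟨k, i, h', hik, hv, ?_⟩
            intro l hl1 hl2
            exact hall l (by omega) hl2
          · have hkk : k = j := by omega
            subst hkk
            exact absurd hv (hnohit i hik)

-- Concrete numeric facts (evaluated by the kernel).
theorem Pf61_big : (2147483648 : Int) < Pf 61 := by decide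
theorem Pf47_big : (2147483648 : Int) < Pf 47 := by decide
theorem fb46_big : (2147483648 : Int) < fb (0+46) := by decide

-- B's characterization on the positive domain: n is a window sum.
theorem B_char (n : Int) (hn : 1 ≤ n) (hN : n ≤ 2147483648) :
    FibSubSeq_alt n = true ↔ ∃ k i : Nat, i < k ∧ Pf k - Pf i = n := by
  have h0 : FibSubSeq_alt n = bloop n 60 (fb 0) (fb 1) (Pf 0) ((List.range 0).map Pf) := rfl
  rw [h0, LB n 60 0 ⟨46, by omega, by have := fb46_big; omega⟩]
  constructor
  · rintro ⟨k, i, -, hik, hv, -⟩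
    refine ⟨k, i, ?_, hv⟩
    rcases Nat.lt_or_ge i k with h' | h'
    · exact h'
    · have hkk : i = k := by omega
      subst hkk; omega
  · rintro ⟨k, i, hik, hv⟩
    refine ⟨k, i, by omega, by omega, hv, ?_⟩
    intro l hl0 hlk
    obtain ⟨m, rfl⟩ : ∃ m, k = m + 1 := ⟨k - 1, by omega⟩
    have h1 : fb l ≤ fb m := fb_mono (by omega)
    have h2 : Pf i ≤ Pf m := Pf_mono_le (by omega)
    have h3 : Pf (m+1) = Pf m + fb m := Pf_succ m
    omega

-- A's characterization, positive case n ≥ 2.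
theorem A_char (n : Int) (hn : 2 ≤ n) (hN : n ≤ 2147483648) :
    FibSubSeq n = true ↔ ∃ k i : Nat, i < k ∧ Pf k - Pf i = n := by
  have hstep : aloop1 n 60 0 0 1 0 = aloop1 n 59 0 (fb 0) (fb 1) (Pf 2) := by
    rw [show (60:Nat) = 59+1 from rfl, aloop1_succ, if_pos (show (0:Int) = 0 from rfl),
        if_neg (show ¬((0:Int) + 1 > n) by omega), if_neg (show ¬((0:Int) + 1 = n) by omega),
        if_pos (show (0:Int) + 1 ≤ n by omega)]
    norm_num [fb, fbAux, Pf]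
  have hL1 := L1 n 59 0 0
      (by simp only [Nat.zero_add]
          have h1 : Pf 1 = 1 := by decide
          omega)
      (by simp only [show (0:Nat)+2+59 = 61 from rfl]
          have := Pf61_big; omega)
  obtain ⟨hnone, hsome⟩ := hL1
  cases haloop : aloop1 n 59 0 (fb 0) (fb 1) (Pf 2) with
  | none =>
    have hw := hnone.mp haloop
    have hA : FibSubSeq n = true := by
      unfold FibSubSeq; rw [hstep, haloop]
    rw [hA]
    constructor
    · intro _
      obtain ⟨k, hk, hPk⟩ := hw
      have h0 : Pf 0 = 0 := rfl
      exact ⟨k, 0, by omega, by omega⟩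
    · intro _; rfl
  | some SR =>
    obtain ⟨K, hK2, rfl, hKle, hKlt⟩ := hsome SR haloop
    have hnp : ∀ k : Nat, Pf k ≠ n := by
      intro k hc
      rcases Nat.lt_or_ge k 2 with h' | h'
      · interval_cases k
        · have h0 : Pf 0 = 0 := rfl
          omega
        · have h1 : Pf 1 = 1 := by decide
          omega
      · exact absurd (hnone.mpr ⟨k, by omega, hc⟩) (by rw [haloop]; simp)
    have hA : FibSubSeq n = aloop2 n (Pf K) 60 0 0 1 0 := by
      unfold FibSubSeq; rw [hstep, haloop]
    have hKlt48 : K < 48 := by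
      by_contra hcon
      have h1 : Pf 47 ≤ Pf (K-1) := Pf_mono_le (by omega)
      have := Pf47_big
      omega
    have hstep2 : aloop2 n (Pf K) 60 0 0 1 0 =
        (if Pf K - 1 = n then true else if Pf K - 2 = n then true
         else aloop2 n (Pf K) 59 0 (fb 0) (fb 1) (Pf 2)) := by
      rw [show (60:Nat) = 59+1 from rfl, aloop2_succ, if_pos (show (0:Int) = 0 from rfl),
          if_pos (show (0:Int) + 1 ≤ Pf K by omega)]
      norm_num [fb, fbAux, Pf]
    have hL2 := L2 n (Pf K) 59 0 0
      (by simp only [Nat.zero_add]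
          have h1 : Pf 1 = 1 := by decide
          have h2 : Pf 1 ≤ Pf K := Pf_mono_le (by omega)
          omega)
      (by simp only [show (0:Nat)+2+59 = 61 from rfl]
          exact Pf_mono_lt (by omega))
    rw [hA, hstep2]
    have hP1 : Pf 1 = 1 := by decide
    have hP2 : Pf 2 = 2 := by decide
    have hP3 : Pf 3 = 4 := by decide
    have hP4 : Pf 4 = 7 := by decide
    have hf2 : fb 2 = 2 := by decide
    have hf3 : fb 3 = 3 := by decide
    have hf4 : fb 4 = 5 := by decide
    by_cases hc1 : Pf K - 1 = n
    · rw [if_pos hc1]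
      constructor
      · intro _
        refine ⟨K, 1, Pf_lt_inv (by omega), by omega⟩
      · intro _; rfl
    · rw [if_neg hc1]
      by_cases hc2 : Pf K - 2 = n
      · rw [if_pos hc2]
        constructor
        · intro _
          refine ⟨K, 2, Pf_lt_inv (by omega), by omega⟩
        · intro _; rfl
      · rw [if_neg hc2, hL2]
        constructor
        · rintro ⟨k, hk2, hkle, hv⟩
          refine ⟨K, k+1, Pf_lt_inv (by omega), by omega⟩
        · rintro ⟨b, a, hab, hv⟩
          have ha1 : 1 ≤ a := by
            by_contra hcon
            have ha0 : a = 0 := by omega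
            subst ha0
            have h0 : Pf 0 = 0 := rfl
            exact hnp b (by omega)
          have hbK : K ≤ b := by
            by_contra hcon
            have h1 : Pf b ≤ Pf (K-1) := Pf_mono_le (by omega)
            have h2 : Pf 1 ≤ Pf a := Pf_mono_le ha1
            omega
          rcases Nat.eq_or_lt_of_le hbK with hbe | hbl
          · -- b = K : the window already ends at the break prefix
            subst hbe
            rcases Nat.lt_or_ge a 3 with ha3 | ha3
            · interval_cases a
              · omega
              · omega
            · obtain ⟨a', rfl⟩ : ∃ a', a = a'+1 := ⟨a-1, by omega⟩
              exact ⟨a', by omega, Pf_mono_le (by omega), by omega⟩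
          · -- K < b : the window is a single Fibonacci number fb a, and K = a
            have hab1 : b = a+1 := by
              by_contra hcon
              obtain ⟨c, rfl⟩ : ∃ c, b = c+2 := ⟨b-2, by omega⟩
              have h1 : Pf a ≤ Pf c := Pf_mono_le (by omega)
              have h2 : Pf c = fb (c+1) - 1 := Pf_eq_fb c
              have h3 : Pf K ≤ Pf (c+1) := Pf_mono_le (by omega)
              have h4 : Pf (c+2) = Pf (c+1) + fb (c+1) := Pf_succ (c+1)
              omega
            subst hab1
            have hnfb : fb a = n := by
              have h1 : Pf (a+1) = Pf a + fb a := Pf_succ a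
              omega
            have hKa : K = a := by
              have hKa1 : K ≤ a := by omega
              by_contra hcon
              obtain ⟨a', rfl⟩ : ∃ a', a = a'+1 := ⟨a-1, by omega⟩
              have h1 : Pf K ≤ Pf a' := Pf_mono_le (by omega)
              have h2 : Pf a' = fb (a'+1) - 1 := Pf_eq_fb a'
              omega
            subst hKa
            have hK3 : 3 ≤ K := by
              by_contra hcon
              have hKK : K = 2 := by omega
              rw [hKK] at hnfb
              exact hnp 2 (by omega)
            by_cases hK3e : K = 3
            · rw [hK3e] at hnfb hc1
              omega
            by_cases hK4e : K = 4
            · rw [hK4e] at hnfb hc2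
              omega
            obtain ⟨m, rfl⟩ : ∃ m, K = m+5 := ⟨K-5, by omega⟩
            refine ⟨m+2, by omega, Pf_mono_le (by omega), ?_⟩
            have hw := Pf_window (m+3)
            rw [show m+3+2 = m+5 by omega] at hw
            have : m+2+1 = m+3 := by omega
            rw [this]
            omega

theorem neg_case (n : Int) (hn : n ≤ -2) : FibSubSeq n = FibSubSeq_alt n := by
  have hA1 : aloop1 n 60 0 0 1 0 = some 1 := by
    rw [show (60:Nat) = 59+1 from rfl, aloop1_succ, if_pos (show (0:Int) = 0 from rfl),
        if_pos (show (0:Int) + 1 > n by omega)]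
    norm_num
  have hA : FibSubSeq n = aloop2 n 1 60 0 0 1 0 := by
    unfold FibSubSeq; rw [hA1]
  have hA2 : aloop2 n 1 60 0 0 1 0 = aloop2 n 1 59 0 1 1 2 := by
    rw [show (60:Nat) = 59+1 from rfl, aloop2_succ, if_pos (show (0:Int) = 0 from rfl),
        if_neg (show ¬((1:Int) - (0 + 1) = n) by omega), if_pos (show (0:Int) + 1 ≤ 1 by omega),
        if_neg (show ¬((1:Int) - (0 + 1 + (1 + 0)) = n) by omega)]
    norm_num
  have hA3 : aloop2 n 1 59 0 1 1 2 = false := by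
    rw [show (59:Nat) = 58+1 from rfl, aloop2_succ, if_neg (show ¬((2:Int) = 0) by omega),
        if_neg (show ¬((2:Int) ≤ 1) by omega)]
  have hB : FibSubSeq_alt n = false := by
    have hadd : PySem.Set.add PySem.Set.empty (0:Int) = [0] := rfl
    have hc : ¬ (PySem.Set.contains ([0] : PySem.Set Int) ((0:Int) - n) = true) := by
      intro h
      have := (PySem.Set.contains_iff _ _).mp h
      simp at this
      omega
    rw [show FibSubSeq_alt n = bloop n (59+1) 1 1 0 PySem.Set.empty from rfl, bloop_succ, hadd,
        if_neg hc, if_pos (show (1:Int) > n by omega)]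
  rw [hA, hA2, hA3, hB]

theorem FibSubSeq_spec : Claim_unchanged_FibSubSeq := by
  intro n hdom
  unfold Spec_FibSubSeq D_FibSubSeq
  intro hD
  unfold Dom_FibSubSeq pvDomInt at hdom
  rw [decide_eq_true_iff] at hdom
  by_cases h1 : n = 0
  · subst h1; decide
  by_cases h2 : n = 1
  · subst h2; decide
  rcases lt_or_ge n 0 with hneg | hpos
  · exact neg_case n (by omega)
  · have hn2 : 2 ≤ n := by omega
    have hiff := (A_char n hn2 (by omega)).trans (B_char n (by omega) (by omega)).symm
    cases hFA : FibSubSeq n <;> cases hFB : FibSubSeq_alt n <;> simp_all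

theorem FibSubSeq_changed : Claim_changed_FibSubSeq := by unfold Claim_changed_FibSubSeq; decide
theorem FibSubSeq_tight : Claim_exact_FibSubSeq := by
  intro n _ hD
  unfold D_FibSubSeq at hD
  subst hD
  decide
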